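-- pv_equiv track=rewrite | github.com/medyahan/ProgrammingLab_COMU | 6-FrekansBulma.py | frequency2
-- ===== SOURCE A (Python) =====
-- def frequency2(list_1):
--     freq=[]
--     for i in range(len(list_1)):
--         s=False
--         for j in range(len(freq)):
--             if (list_1[i]==freq[j][0]):
--                 freq[j][1]=freq[j][1]+1
--                 s=True
--
--         if (s==False):
--             freq.append([list_1[i],1])  #indis[0[1] +=1
--     return freq
-- ===== SOURCE B (Python) =====
-- def frequency2(list_1):
--     # Stage 1: distinct values in first-occurrence order; Stage 2: count each by a direct scan.
--     return [[x, list_1.count(x)] for x in dict.fromkeys(list_1)]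
-- ===== Notes on version B (the rewrite author's own statement) =====
-- stated objective: simpler
-- what changed: Replaces A's single combined loop that incrementally bumps counts in a mutable freq list with two staged passes: dedup to the distinct values in first-occurrence order (dict.fromkeys), then count each distinct value with one direct list.count scan; B maintains no running counts at all.
import Mathlib
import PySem

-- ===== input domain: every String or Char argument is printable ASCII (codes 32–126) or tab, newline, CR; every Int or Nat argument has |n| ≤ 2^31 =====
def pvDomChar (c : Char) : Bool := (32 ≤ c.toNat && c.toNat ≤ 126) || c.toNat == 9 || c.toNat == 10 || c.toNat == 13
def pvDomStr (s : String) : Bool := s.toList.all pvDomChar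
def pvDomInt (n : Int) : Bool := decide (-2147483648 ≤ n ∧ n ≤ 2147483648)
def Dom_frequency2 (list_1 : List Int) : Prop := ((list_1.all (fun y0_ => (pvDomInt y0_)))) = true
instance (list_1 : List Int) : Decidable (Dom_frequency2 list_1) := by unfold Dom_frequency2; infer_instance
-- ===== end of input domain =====

-- B replaces A's single incremental-count loop (mutable freq list rescanned per element)
-- with two staged passes: dedup in first-occurrence order, then one count scan per
-- distinct value (objective: simpler — no running counts are maintained).

-- ===== PORT A =====
-- inner 'for j in range(len(freq))' loop: bump every matching entry, record whether one matched
def innerA (x : Int) : List (List Int) → List (List Int) × Bool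
  | [] => ([], false)
  | e :: rest =>
    let e' := if x = PySem.List.pyGetD e 0 0
              then PySem.List.pySetD e 1 (PySem.List.pyGetD e 1 0 + 1)
              else e
    let p := innerA x rest
    (e' :: p.1, (decide (x = PySem.List.pyGetD e 0 0)) || p.2)

def frequency2 (list_1 : List Int) : List (List Int) :=
  list_1.foldl (fun freq xi =>
    let p := innerA xi freq
    if p.2 then p.1 else p.1 ++ [[xi, 1]]) []

-- ===== PORT B =====
-- dict.fromkeys(list_1) as ordered dedup = PySem.List.dedup; list_1.count(x) = PySem.List.count
def frequency2_alt (list_1 : List Int) : List (List Int) :=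
  (PySem.List.dedup list_1).map (fun x => [x, PySem.List.count list_1 x])

-- ===== PRECONDITION & SPEC =====
def Spec_frequency2 (list_1 : List Int) (out : List (List Int)) : Prop := out = frequency2_alt list_1
instance (list_1 : List Int) (out : List (List Int)) : Decidable (Spec_frequency2 list_1 out) := by unfold Spec_frequency2; infer_instance

-- ===== CLAIM (what is proved, stated in full; the proofs are below) =====
def Claim_equal_frequency2 : Prop := ∀ (list_1 : List Int), Dom_frequency2 list_1 → Spec_frequency2 list_1 (frequency2 list_1)

-- ===== LEMMAS AND PROOFS =====

-- the inner loop on a freq list of [key, count] pairs: bump matching counts, detect membership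
lemma innerA_map (x : Int) (L : List Int) (c : Int → Int) :
    innerA x (L.map fun k => [k, c k]) =
      (L.map fun k => [k, if k = x then c k + 1 else c k], L.contains x) := by
  induction L with
  | nil => rfl
  | cons a L ih =>
    simp only [List.map_cons, innerA, ih, List.contains_cons]
    by_cases h : x = a
    · subst h
      simp [PySem.List.pyGetD, PySem.List.pySetD, PySem.List.pySet?, PySem.List.pyIdx?]
    · simp [PySem.List.pyGetD, h, Ne.symm h]

-- A's fold, started from any prefix's state, reaches the closed-form state
lemma frequency2_inv (xs : List Int) : ∀ (pre : List Int),
    (xs.foldl (fun freq xi =>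
        let p := innerA xi freq
        if p.2 then p.1 else p.1 ++ [[xi, 1]])
      ((PySem.Set.ofList pre).map fun k => [k, (pre.count k : Int)])) =
    (PySem.Set.ofList (pre ++ xs)).map fun k => [k, ((pre ++ xs).count k : Int)] := by
  induction xs with
  | nil => intro pre; simp
  | cons x xs ih =>
    intro pre
    have hstep :
        (let p := innerA x ((PySem.Set.ofList pre).map fun k => [k, (pre.count k : Int)]);
          if p.2 then p.1 else p.1 ++ [[x, 1]]) =
        (PySem.Set.ofList (pre ++ [x])).map fun k => [k, ((pre ++ [x]).count k : Int)] := by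
      rw [innerA_map]
      dsimp only
      by_cases hx : x ∈ pre
      · have hmem : x ∈ PySem.Set.ofList pre := (PySem.Set.mem_ofList pre x).2 hx
        have hc : List.contains (PySem.Set.ofList pre) x = true := by simpa using hmem
        rw [PySem.Set.ofList_append_singleton, PySem.Set.add_of_mem hmem]
        rw [if_pos hc]
        apply List.map_congr_left
        intro k hk
        by_cases hkx : k = x
        · subst hkx
          simp [List.count_append]
        · simp [List.count_append, hkx, Ne.symm hkx]
      · have hmem : x ∉ PySem.Set.ofList pre := fun h => hx ((PySem.Set.mem_ofList pre x).1 h)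
        rw [PySem.Set.ofList_append_singleton, PySem.Set.add_of_not_mem hmem, List.map_append,
          if_neg (by simpa using hx)]
        congr 1
        · apply List.map_congr_left
          intro k hk
          have hkpre : k ∈ pre := (PySem.Set.mem_ofList pre k).1 hk
          have hkx : k ≠ x := fun h => hx (h ▸ hkpre)
          simp [List.count_append, hkx, Ne.symm hkx]
        · have h0 : pre.count x = 0 := List.count_eq_zero.2 hx
          simp [List.count_append, h0]
    rw [List.foldl_cons]
    simp only at hstep
    rw [hstep, show pre ++ x :: xs = (pre ++ [x]) ++ xs by simp]
    exact ih (pre ++ [x])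

lemma frequency2_eq (xs : List Int) :
    frequency2 xs = (PySem.Set.ofList xs).map fun k => [k, (xs.count k : Int)] := by
  have h := frequency2_inv xs []
  simpa [frequency2] using h

-- ===== VERDICT (by name: the statement is the Claim_ definition above) =====
theorem frequency2_spec : Claim_equal_frequency2 := by
  intro xs _
  unfold Spec_frequency2
  rw [frequency2_eq]
  unfold frequency2_alt
  simp [PySem.List.count_eq]
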